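-- pv_equiv track=rewrite | github.com/VitorPDB/Challenge2025-Ache-AGVision | app_final.py | _fix_broken_lines
-- ===== SOURCE A (Python) =====
-- def _fix_broken_lines(text: str, quotechar: str = '"') -> str:
--     out, buf, open_quotes = [], [], 0
--     for line in text.splitlines():
--         buf.append(line)
--         open_quotes += line.count(quotechar)
--         if open_quotes % 2 == 0:
--             out.append(" ".join(buf))
--             buf, open_quotes = [], 0
--     if buf: out.append(" ".join(buf))
--     return "\n".join(out)
-- ===== SOURCE B (Python) =====
-- def _fix_broken_lines(text: str, quotechar: str = '"') -> str:
--     lines = text.splitlines()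
--     parity = [0]
--     for line in lines:
--         parity.append((parity[-1] + line.count(quotechar)) % 2)
--     segs, start = [], 0
--     for i in range(1, len(lines) + 1):
--         if parity[i] == 0 or i == len(lines):
--             segs.append(" ".join(lines[start:i]))
--             start = i
--     return "\n".join(segs)
-- ===== Notes on version B (the rewrite author's own statement) =====
-- stated objective: alternative
-- what changed: Replaces A's single stateful buffer-and-flush loop by a two-pass decomposition: first build a cumulative quote-parity prefix table over the split lines, then cut the line list into segments by slicing at the indices where the parity is even (or at the end), joining each slice.
import Mathlib
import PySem

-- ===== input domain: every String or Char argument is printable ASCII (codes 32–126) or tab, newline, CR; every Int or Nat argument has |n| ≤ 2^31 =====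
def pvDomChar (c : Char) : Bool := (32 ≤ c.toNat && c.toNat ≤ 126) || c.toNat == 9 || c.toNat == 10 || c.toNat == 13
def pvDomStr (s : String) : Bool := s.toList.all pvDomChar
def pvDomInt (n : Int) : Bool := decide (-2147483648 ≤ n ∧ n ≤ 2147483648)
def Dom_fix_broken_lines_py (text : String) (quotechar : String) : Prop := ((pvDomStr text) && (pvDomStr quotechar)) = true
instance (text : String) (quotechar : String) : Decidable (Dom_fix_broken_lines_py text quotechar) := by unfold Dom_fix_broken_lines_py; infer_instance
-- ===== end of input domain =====

-- B replaces A's stateful buffer-and-flush loop by a prefix-parity table plus an index-driven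
-- slicing pass (different decomposition, same cost; objective: alternative).

-- ===== PORT A =====
def fblStepA (quotechar : String) (st : List String × List String × Int) (line : String) :
    List String × List String × Int :=
  let buf := st.2.1 ++ [line]
  let oq := st.2.2 + (PySem.Str.count line quotechar : Int)
  if oq % 2 = 0 then (st.1 ++ [PySem.Str.join " " buf], [], 0) else (st.1, buf, oq)

def fix_broken_lines_py (text : String) (quotechar : String) : String :=
  let st := (PySem.Str.splitlines text).foldl (fblStepA quotechar) ([], [], 0)
  PySem.Str.join "\n" (if st.2.1 = [] then st.1 else st.1 ++ [PySem.Str.join " " st.2.1])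

-- ===== PORT B =====
-- parity[-1]: the parity list starts as [0] and only grows, so it is never empty; getD 0 is exact.
def fblPStep (quotechar : String) (p : List Int) (line : String) : List Int :=
  p ++ [(PySem.List.pyGetD p (-1) 0 + (PySem.Str.count line quotechar : Int)) % 2]

def fblStepB (lines : List String) (parity : List Int) (st : List String × Int) (i : Int) :
    List String × Int :=
  if PySem.List.pyGetD parity i 0 = 0 ∨ i = (lines.length : Int) then
    (st.1 ++ [PySem.Str.join " " (PySem.List.slice lines (some st.2) (some i))], i)
  else st

def fix_broken_lines_py_alt (text : String) (quotechar : String) : String :=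
  let lines := PySem.Str.splitlines text
  let parity := lines.foldl (fblPStep quotechar) [0]
  let st := (PySem.List.pyRange 1 ((lines.length : Int) + 1) 1).foldl
    (fblStepB lines parity) ([], 0)
  PySem.Str.join "\n" st.1

-- ===== PRECONDITION & SPEC =====
def Spec_fix_broken_lines_py (text : String) (quotechar : String) (out : String) : Prop := out = fix_broken_lines_py_alt text quotechar
instance (text : String) (quotechar : String) (out : String) : Decidable (Spec_fix_broken_lines_py text quotechar out) := by unfold Spec_fix_broken_lines_py; infer_instance

-- ===== CLAIM (what is proved, stated in full; the proofs are below) =====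
def Claim_equal_fix_broken_lines_py : Prop := ∀ (text : String) (quotechar : String), Dom_fix_broken_lines_py text quotechar → Spec_fix_broken_lines_py text quotechar (fix_broken_lines_py text quotechar)

-- ===== LEMMAS AND PROOFS =====

-- common abstraction: the list of merged groups, with the exact quote count of the open buffer
def fblGroups (q : String) : List String → List String → Int → List (List String)
  | [], buf, _ => if buf = [] then [] else [buf]
  | l :: ls, buf, t =>
    if (t + (PySem.Str.count l q : Int)) % 2 = 0 then
      (buf ++ [l]) :: fblGroups q ls [] 0
    else fblGroups q ls (buf ++ [l]) (t + (PySem.Str.count l q : Int))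

-- prefix quote-count sum
def fblSum (q : String) (lines : List String) (k : Nat) : Int :=
  ((lines.take k).map (fun l => (PySem.Str.count l q : Int))).sum

-- the tail of the parity list as a scan
def fblScan (q : String) : List String → Int → List Int
  | [], _ => []
  | l :: ls, t => ((t + (PySem.Str.count l q : Int)) % 2) :: fblScan q ls ((t + (PySem.Str.count l q : Int)) % 2)

theorem fblScan_length (q : String) (ls : List String) (t : Int) :
    (fblScan q ls t).length = ls.length := by
  induction ls generalizing t with
  | nil => rfl
  | cons l ls ih => simp [fblScan, ih]

theorem fblScan_getElem (q : String) (ls : List String) (t : Int) (i : Nat)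
    (h : i < ls.length) :
    (fblScan q ls t)[i]'(by rw [fblScan_length]; exact h)
      = (t + fblSum q ls (i + 1)) % 2 := by
  induction ls generalizing t i with
  | nil => simp at h
  | cons l ls ih =>
    cases i with
    | zero => simp [fblScan, fblSum]
    | succ i =>
      have := ih ((t + (PySem.Str.count l q : Int)) % 2) i (by simpa using h)
      simp only [fblScan, List.getElem_cons_succ, this, fblSum, List.take_succ_cons,
        List.map_cons, List.sum_cons]
      omega

theorem fblPStep_foldl (q : String) (ls : List String) (p : List Int) (hp : p ≠ []) :
    ls.foldl (fblPStep q) p = p ++ fblScan q ls (p.getLast hp) := by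
  induction ls generalizing p with
  | nil => simp [fblScan]
  | cons l ls ih =>
    have hne : p ++ [(p.getLast hp + (PySem.Str.count l q : Int)) % 2] ≠ [] := by simp
    simp only [List.foldl_cons, fblPStep, PySem.List.pyGetD_neg_one p 0 hp, ih _ hne,
      List.getLast_append_singleton (l := p), fblScan]
    simp

theorem fblParity_getD (q : String) (lines : List String) (i : Nat) (h : i ≤ lines.length) :
    PySem.List.pyGetD (lines.foldl (fblPStep q) [0]) ((i : Nat) : Int) 0
      = fblSum q lines i % 2 := by
  rw [fblPStep_foldl q lines [0] (by simp)]
  rw [PySem.List.pyGetD_natCast]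
  cases i with
  | zero => simp [fblSum]
  | succ i =>
    have hi : i < lines.length := by omega
    have hlen : i < (fblScan q lines ((0:Int))).length := by rw [fblScan_length]; exact hi
    have : (([0] ++ fblScan q lines 0).getD (i+1) 0) = (fblScan q lines 0)[i]'hlen := by
      simp [List.getD, hlen]
    rw [List.getLast_singleton] at *
    rw [this, fblScan_getElem q lines 0 i hi]
    omega

-- finalizer of A's loop state ('if buf: out.append(...)')
def fblFin (st : List String × List String × Int) : List String :=
  if st.2.1 = [] then st.1 else st.1 ++ [PySem.Str.join " " st.2.1]

-- A's fold computes the groups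
theorem fblA_foldl (q : String) (ls : List String) (out buf : List String) (t : Int) :
    fblFin (ls.foldl (fblStepA q) (out, buf, t))
      = out ++ (fblGroups q ls buf t).map (PySem.Str.join " ") := by
  induction ls generalizing out buf t with
  | nil =>
    simp only [List.foldl_nil, fblGroups, fblFin]
    split_ifs with h <;> simp
  | cons l ls ih =>
    simp only [List.foldl_cons, fblStepA]
    have hg : fblGroups q (l :: ls) buf t
        = if (t + (PySem.Str.count l q : Int)) % 2 = 0 then
            (buf ++ [l]) :: fblGroups q ls [] 0
          else fblGroups q ls (buf ++ [l]) (t + (PySem.Str.count l q : Int)) := rfl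
    by_cases h : (t + (PySem.Str.count l q : Int)) % 2 = 0
    · rw [if_pos h, ih, hg, if_pos h]
      simp
    · rw [if_neg h, ih, hg, if_neg h]

-- B's fold computes the groups: invariant over the remaining index range
theorem fblB_foldl (q : String) (lines : List String) (d s0 s : Nat)
    (segs : List String) (hd : lines.length - s = d) (h01 : s0 ≤ s) (h1 : s ≤ lines.length)
    (h2 : s = lines.length → s0 = lines.length)
    (h3 : s < lines.length → fblSum q lines s0 % 2 = 0) :
    ((PySem.List.pyRange ((s : Int) + 1) ((lines.length : Int) + 1) 1).foldl
        (fblStepB lines (lines.foldl (fblPStep q) [0])) (segs, (s0 : Int))).1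
      = segs ++ (fblGroups q (lines.drop s) ((lines.drop s0).take (s - s0))
          (fblSum q lines s - fblSum q lines s0)).map (PySem.Str.join " ") := by
  induction d generalizing s0 s segs with
  | zero =>
    have hs : s = lines.length := by omega
    have hs0 : s0 = lines.length := h2 hs
    subst hs
    subst hs0
    rw [PySem.List.pyRange_one_eq_nil (by omega)]
    simp only [List.drop_length, Nat.sub_self, List.take_zero, List.foldl_nil]
    have hnil : fblGroups q [] ([] : List String)
        (fblSum q lines lines.length - fblSum q lines lines.length) = [] := rfl
    rw [hnil]
    simp
  | succ d ih =>
    have hslt : s < lines.length := by omega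
    have hl : lines.drop s = lines[s] :: lines.drop (s + 1) :=
      (List.getElem_cons_drop hslt).symm
    have hS : fblSum q lines (s + 1) = fblSum q lines s + (PySem.Str.count lines[s] q : Int) := by
      have ht : lines.take (s + 1) = lines.take s ++ [lines[s]] := by
        rw [List.take_succ, List.getElem?_eq_getElem hslt]
        rfl
      unfold fblSum
      rw [ht, List.map_append, List.sum_append]
      simp
    rw [PySem.List.pyRange_one_cons (by omega), List.foldl_cons]
    have hcast : ((s : Int) + 1) = (((s + 1 : Nat) : Nat) : Int) := by push_cast; ring
    have hpar : PySem.List.pyGetD (lines.foldl (fblPStep q) [0]) ((s : Int) + 1) 0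
        = fblSum q lines (s + 1) % 2 := by
      rw [hcast, fblParity_getD q lines (s + 1) (by omega)]
    have hbufsucc : (lines.drop s0).take (s + 1 - s0)
        = (lines.drop s0).take (s - s0) ++ [lines[s]] := by
      have h1' : s + 1 - s0 = (s - s0) + 1 := by omega
      rw [h1', List.take_succ]
      have : (lines.drop s0)[s - s0]? = some lines[s] := by
        rw [List.getElem?_drop]
        have : s0 + (s - s0) = s := by omega
        rw [this, List.getElem?_eq_getElem hslt]
      simp [this]
    by_cases hflush : fblSum q lines (s + 1) % 2 = 0 ∨ s + 1 = lines.length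
    · -- B flushes at index s+1
      have hcond : PySem.List.pyGetD (lines.foldl (fblPStep q) [0]) ((s : Int) + 1) 0 = 0
          ∨ ((s : Int) + 1) = (lines.length : Int) := by
        rcases hflush with h | h
        · exact Or.inl (by rw [hpar, h])
        · exact Or.inr (by omega)
      have hslice : PySem.List.slice lines (some (s0 : Int)) (some ((s : Int) + 1))
          = (lines.drop s0).take (s + 1 - s0) := by
        rw [hcast]
        rw [show (((s+1 : Nat) : Nat) : Int) = ((s+1 : Nat) : Int) from rfl]
        rw [PySem.List.slice_natCast]
      rw [show fblStepB lines (lines.foldl (fblPStep q) [0]) (segs, (s0 : Int)) ((s : Int) + 1)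
          = (segs ++ [PySem.Str.join " " ((lines.drop s0).take (s + 1 - s0))], ((s : Int) + 1)) by
        simp only [fblStepB, if_pos hcond, hslice]]
      by_cases hpar2 : fblSum q lines (s + 1) % 2 = 0
      · -- group closes with even parity: recurse with a fresh buffer
        have := ih (s + 1) (s + 1) (segs ++ [PySem.Str.join " " ((lines.drop s0).take (s + 1 - s0))])
          (by omega) (le_refl _) (by omega) (fun h => h) (fun _ => hpar2)
        rw [show ((s : Int) + 1) = (((s + 1 : Nat)) : Int) by push_cast; ring, this]
        rw [hl]
        simp only [fblGroups]
        rw [if_pos (by have h3' := h3 hslt; omega)]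
        simp [hbufsucc, fblSum]
      · -- odd tail flushed only because s+1 = n: the loop ends here
        have hn : s + 1 = lines.length := by tauto
        rw [show ((s : Int) + 1) = ((lines.length : Int)) by omega]
        rw [PySem.List.pyRange_one_eq_nil (by omega)]
        rw [hl]
        simp only [fblGroups]
        rw [if_neg (by have h3' := h3 hslt; omega)]
        rw [show lines.drop (s + 1) = [] by simp [hn]]
        simp only [fblGroups]
        rw [if_neg (by simp [hbufsucc])]
        rw [hbufsucc]
        simp
    · -- no flush: buffer grows
      push_neg at hflush
      obtain ⟨hodd, hne⟩ := hflush
      have hcond : ¬ (PySem.List.pyGetD (lines.foldl (fblPStep q) [0]) ((s : Int) + 1) 0 = 0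
          ∨ ((s : Int) + 1) = (lines.length : Int)) := by
        push_neg
        constructor
        · rw [hpar]; exact hodd
        · omega
      rw [show fblStepB lines (lines.foldl (fblPStep q) [0]) (segs, (s0 : Int)) ((s : Int) + 1)
          = (segs, (s0 : Int)) by simp only [fblStepB, if_neg hcond]]
      have := ih s0 (s + 1) segs (by omega) (by omega) (by omega) (fun h => absurd h hne)
        (fun _ => h3 hslt)
      rw [show ((s : Int) + 1) = (((s + 1 : Nat)) : Int) by push_cast; ring, this]
      rw [hl]
      simp only [fblGroups]
      rw [if_neg (by have h3' := h3 hslt; omega)]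
      rw [hbufsucc]
      rw [show fblSum q lines (s + 1) - fblSum q lines s0
          = fblSum q lines s - fblSum q lines s0 + (PySem.Str.count lines[s] q : Int) by
        rw [hS]; ring]

-- ===== VERDICT (by name: the statement is the Claim_ definition above) =====
theorem fix_broken_lines_py_spec : Claim_equal_fix_broken_lines_py := by
  intro text quotechar _
  unfold Spec_fix_broken_lines_py
  simp only [fix_broken_lines_py, fix_broken_lines_py_alt]
  have hA := fblA_foldl quotechar (PySem.Str.splitlines text) [] [] 0
  unfold fblFin at hA
  rw [hA]
  have hB := fblB_foldl quotechar (PySem.Str.splitlines text)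
    ((PySem.Str.splitlines text).length) 0 0 [] rfl (le_refl _) (Nat.zero_le _)
    (fun h => h) (fun _ => by simp [fblSum])
  rw [show (((0 : Nat) : Int) + 1) = (1 : Int) by norm_num] at hB
  simp only [Nat.cast_zero] at hB
  rw [hB]
  simp [fblSum]
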